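-- pv_equiv track=rewrite | github.com/irishNoah/Algorithm-Study | Programmers(프로그래머스)/LV2/연습문제/프로그래머스 LV2 - 멀쩡한 사각형.py | solution
-- ===== SOURCE A (Python) =====
-- def solution(w,h):
--     gcd_value = 0
--
--     # 유클리드 호제법을 이용하여 w, h의 최대공약수 구하기
--     for i in range(min(w, h), 0, -1):
--         if w % i == 0 and h % i == 0:
--             gcd_value = i
--             break
--
--     '''
--     한 직각삼각형 안에 멀쩡한 정사각형 갯수를 구하는 공식은 다음과 같다.
--     참고 : https://m.blog.naver.com/PostView.naver?isHttpsRedirect=true&blogId=orbis1020&logNo=220674508134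
--     (대각선에 의해 잘려진 사각형의 개수) : (가로) + (세로) - (가로 세로의 최대공약수)
--
--     즉, 이것을 w = 8, h = 12를 대입했을 때 (가로 세로의 최대공약수) = 4이므로
--     (대각선에 의해 잘려진 사각형의 개수) = 8 + 12 - 4 = 16이다.
--
--     문제에서 8, 12가 주어졌을 때 답이 80이었다.
--     이것을 통해 알 수 있는 것이 있는데, 그것은 다음과 같다.
--     멀쩡한 사각형 = 가로 * 세로 - (대각선에 의해 잘려진 사각형의 개수)
--
--     이것을 바로 answer에 적용한다.
--     '''
--     answer = (w * h) - (w + h - gcd_value)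
--
--     return answer
-- ===== SOURCE B (Python) =====
-- def solution(w, h):
--     # gcd by Euclidean mod-reduction instead of scanning every candidate divisor;
--     # only positive dimensions have a candidate divisor, otherwise g = 0
--     if w > 0 and h > 0:
--         a, b = w, h
--         while b:
--             a, b = b, a % b
--         g = a
--     else:
--         g = 0
--     return w * h - (w + h - g)
-- ===== Notes on version B (the rewrite author's own statement) =====
-- stated objective: faster
-- what changed: Replaces A's downward scan over every candidate divisor from min(w,h) with a handwritten Euclidean mod-reduction loop (a,b = b,a%b) to compute the gcd, keeping the final counting formula; when no positive candidate exists (min(w,h) <= 0) the gcd term is 0 exactly as in A.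
import Mathlib
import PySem

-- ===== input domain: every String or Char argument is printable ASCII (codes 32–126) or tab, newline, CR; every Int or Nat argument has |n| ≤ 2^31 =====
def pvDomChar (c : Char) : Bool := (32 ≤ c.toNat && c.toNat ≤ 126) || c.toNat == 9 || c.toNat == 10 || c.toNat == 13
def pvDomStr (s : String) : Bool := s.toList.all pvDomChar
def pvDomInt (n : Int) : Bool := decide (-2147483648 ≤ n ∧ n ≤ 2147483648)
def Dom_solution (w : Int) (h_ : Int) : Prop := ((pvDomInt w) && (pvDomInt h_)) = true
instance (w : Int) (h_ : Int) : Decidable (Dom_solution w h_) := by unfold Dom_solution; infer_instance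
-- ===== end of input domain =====

-- B replaces A's downward divisor scan with a handwritten Euclidean mod-reduction loop (same final formula).

-- ===== PORT A =====
-- the for-loop with break: first i in the countdown range dividing both, else the initial gcd_value = 0
def solutionLoop (w : Int) (h_ : Int) : List Int → Int
  | [] => 0
  | i :: rest =>
      if PySem.Int.mod w i = 0 ∧ PySem.Int.mod h_ i = 0 then i
      else solutionLoop w h_ rest

def solution (w : Int) (h_ : Int) : Int :=
  let gcd_value := solutionLoop w h_ (PySem.List.pyRange (min w h_) 0 (-1))
  (w * h_) - (w + h_ - gcd_value)

-- ===== PORT B =====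
-- needed by euclidLoop's decreasing_by: |a % b| < |b| for b ≠ 0 (Python mod)
theorem pymod_natAbs_lt (a b : Int) (hb : b ≠ 0) :
    (PySem.Int.mod a b).natAbs < b.natAbs := by
  rcases lt_or_gt_of_ne hb with h | h
  · have := PySem.Int.mod_neg_bounds a h
    omega
  · have h1 := PySem.Int.mod_nonneg a h
    have h2 := PySem.Int.mod_lt a h
    omega

-- while b: a, b = b, a % b
def euclidLoop (a : Int) (b : Int) : Int :=
  if _hb : b = 0 then a
  else euclidLoop b (PySem.Int.mod a b)
termination_by b.natAbs
decreasing_by exact pymod_natAbs_lt a b _hb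

def solution_alt (w : Int) (h_ : Int) : Int :=
  let g := if 0 < w ∧ 0 < h_ then euclidLoop w h_ else 0
  w * h_ - (w + h_ - g)

-- ===== PRECONDITION & SPEC =====
def Spec_solution (w : Int) (h_ : Int) (out : Int) : Prop := out = solution_alt w h_
instance (w : Int) (h_ : Int) (out : Int) : Decidable (Spec_solution w h_ out) := by unfold Spec_solution; infer_instance

-- ===== CLAIM (what is proved, stated in full; the proofs are below) =====
def Claim_equal_solution : Prop := ∀ (w : Int) (h_ : Int), Dom_solution w h_ → Spec_solution w h_ (solution w h_)

-- ===== LEMMAS AND PROOFS =====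

-- gcd absorbs a Python/E-mod step
theorem gcd_emod_step (a b : Int) : Int.gcd b (a % b) = Int.gcd a b := by
  apply Nat.dvd_antisymm
  · apply Int.dvd_gcd
    · have h1 : ((Int.gcd b (a % b) : Int)) ∣ b := Int.gcd_dvd_left b (a % b)
      have h2 : ((Int.gcd b (a % b) : Int)) ∣ a % b := Int.gcd_dvd_right b (a % b)
      have h3 : ((Int.gcd b (a % b) : Int)) ∣ b * (a / b) + a % b :=
        dvd_add (Dvd.dvd.mul_right h1 _) h2
      rwa [Int.mul_ediv_add_emod] at h3
    · exact Int.gcd_dvd_left b (a % b)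
  · apply Int.dvd_gcd
    · exact Int.gcd_dvd_right a b
    · have h1 : ((Int.gcd a b : Int)) ∣ a := Int.gcd_dvd_left a b
      have h2 : ((Int.gcd a b : Int)) ∣ b := Int.gcd_dvd_right a b
      have : a % b = a - b * (a / b) := by
        have := Int.mul_ediv_add_emod a b; omega
      rw [this]; exact dvd_sub h1 (Dvd.dvd.mul_right h2 _)

theorem euclidLoop_eq_gcd (a b : Int) (ha : 0 ≤ a) (hb : 0 ≤ b) :
    euclidLoop a b = Int.gcd a b := by
  induction hn : b.natAbs using Nat.strong_induction_on generalizing a b with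
  | _ n ih =>
    rw [euclidLoop]
    by_cases h0 : b = 0
    · simp [h0, Int.gcd, Int.natAbs_of_nonneg ha]
    · simp only [h0, dite_false]
      have hbpos : 0 < b := lt_of_le_of_ne hb (Ne.symm h0)
      have hmod : PySem.Int.mod a b = a % b := PySem.Int.mod_eq_emod_of_pos hbpos
      rw [hmod]
      have hlt : (a % b).natAbs < n := by
        subst hn
        have h1 := Int.emod_nonneg a h0
        have h2 := Int.emod_lt_of_pos a hbpos
        omega
      rw [ih _ hlt b (a % b) hb (Int.emod_nonneg a h0) rfl]
      exact congrArg _ (gcd_emod_step a b)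

-- common positive divisors of positive w,h are at most gcd
theorem cdvd_le_gcd (w h_ i : Int) (hw : 1 ≤ w) (hi : 0 < i)
    (h1 : i ∣ w) (h2 : i ∣ h_) : i ≤ (Int.gcd w h_ : Int) := by
  have hd : i ∣ (Int.gcd w h_ : Int) := by
    have hcast : ((i.toNat : Nat) : Int) = i := Int.toNat_of_nonneg (le_of_lt hi)
    have h3 := Int.dvd_gcd (a := w) (b := h_) (c := i.toNat)
      (by rwa [hcast]) (by rwa [hcast])
    have h4 := Int.natCast_dvd_natCast.mpr h3
    rwa [hcast] at h4
  have hgpos : 0 < (Int.gcd w h_ : Int) := by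
    have : Int.gcd w h_ ≠ 0 := by
      simp [Int.gcd_eq_zero_iff]; omega
    positivity
  exact Int.le_of_dvd hgpos hd

theorem solutionLoop_range (w h_ : Int) (hw : 1 ≤ w) (_hh : 1 ≤ h_) :
    ∀ (n : Nat) (m : Int), (Int.gcd w h_ : Int) ≤ m → (m - Int.gcd w h_).toNat = n →
      solutionLoop w h_ (PySem.List.pyRange m 0 (-1)) = Int.gcd w h_ := by
  have hgpos : 0 < (Int.gcd w h_ : Int) := by
    have : Int.gcd w h_ ≠ 0 := by simp [Int.gcd_eq_zero_iff]; omega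
    positivity
  intro n
  induction n with
  | zero =>
    intro m hge h0
    have hm : m = Int.gcd w h_ := by omega
    subst hm
    rw [PySem.List.pyRange_neg_one_cons (by omega), solutionLoop]
    have d1 : PySem.Int.mod w (Int.gcd w h_) = 0 :=
      (PySem.Int.mod_eq_zero_iff_dvd _ _).mpr (Int.gcd_dvd_left w h_)
    have d2 : PySem.Int.mod h_ (Int.gcd w h_) = 0 :=
      (PySem.Int.mod_eq_zero_iff_dvd _ _).mpr (Int.gcd_dvd_right w h_)
    simp [d1, d2]
  | succ k ih =>
    intro m hge h0
    have hmpos : 0 < m := by omega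
    rw [PySem.List.pyRange_neg_one_cons (by omega), solutionLoop]
    have hnd : ¬ (PySem.Int.mod w m = 0 ∧ PySem.Int.mod h_ m = 0) := by
      rintro ⟨c1, c2⟩
      have hd1 := (PySem.Int.mod_eq_zero_iff_dvd _ _).mp c1
      have hd2 := (PySem.Int.mod_eq_zero_iff_dvd _ _).mp c2
      have := cdvd_le_gcd w h_ m hw hmpos hd1 hd2
      omega
    rw [if_neg hnd]
    exact ih (m - 1) (by omega) (by omega)

-- ===== VERDICT (by name: the statement is the Claim_ definition above) =====
theorem solution_spec : Claim_equal_solution := by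
  intro w h_ _
  unfold Spec_solution solution solution_alt
  by_cases hpos : 0 < w ∧ 0 < h_
  case neg =>
    have hmin : min w h_ ≤ 0 := by omega
    rw [if_neg hpos, PySem.List.pyRange_neg_one_eq_nil hmin]
    rfl
  obtain ⟨hw', hh'⟩ := hpos
  have hw : 1 ≤ w := hw'
  have hh : 1 ≤ h_ := hh'
  rw [if_pos ⟨hw', hh'⟩]
  have hgle : (Int.gcd w h_ : Int) ≤ min w h_ := by
    have h1 : (Int.gcd w h_ : Int) ≤ w :=
      Int.le_of_dvd (by omega) (Int.gcd_dvd_left w h_)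
    have h2 : (Int.gcd w h_ : Int) ≤ h_ :=
      Int.le_of_dvd (by omega) (Int.gcd_dvd_right w h_)
    omega
  rw [solutionLoop_range w h_ hw hh _ (min w h_) hgle rfl,
      euclidLoop_eq_gcd w h_ (by omega) (by omega)]
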